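-- pv_equiv track=rewrite | github.com/pairz7/Simple_C_Compiler | LexerForSyntaxer.py | is_int_constant
-- ===== SOURCE A (Python) =====
-- def is_int_constant(token):
--     state = 0
--     if token == '':
--         return False
--     for i,ch in enumerate(token):
--         if state == 0:
--             if ch=='0':
--                 state = 1
--             elif '9' >= ch >= '1':
--                 state = 2
--             else:
--                 return False
--         elif state == 1:
--             return False
--         elif state == 2:
--             if '9' >= ch >= '0':
--                 state = 2
--             else:
--                 return False
--     if state == 2 or state==1:
--         return True
--     else:
--         return False
-- ===== SOURCE B (Python) =====
-- def is_int_constant(token):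
--     if token == '':
--         return False
--     if token == '0':
--         return True
--     if token[0] == '0':
--         return False
--     return all('0' <= ch <= '9' for ch in token)
-- ===== Notes on version B (the rewrite author's own statement) =====
-- stated objective: simpler
-- what changed: Replaces the 0/1/2 state machine threaded through a per-character loop by explicit up-front guards (empty, '0', leading zero) plus one uniform all-digits scan.
import Mathlib
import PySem

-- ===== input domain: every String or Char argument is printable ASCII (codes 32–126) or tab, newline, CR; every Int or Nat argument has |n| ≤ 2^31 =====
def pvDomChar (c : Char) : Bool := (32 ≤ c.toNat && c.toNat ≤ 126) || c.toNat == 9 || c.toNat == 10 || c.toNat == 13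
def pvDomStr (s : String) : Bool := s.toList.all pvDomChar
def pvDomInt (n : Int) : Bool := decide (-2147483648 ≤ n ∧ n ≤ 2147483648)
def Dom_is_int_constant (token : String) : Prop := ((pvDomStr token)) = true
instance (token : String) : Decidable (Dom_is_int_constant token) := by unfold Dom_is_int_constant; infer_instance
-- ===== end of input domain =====

-- B replaces A's per-character 0/1/2 state machine by up-front guards plus one uniform all-digits scan; same values everywhere.

-- ===== PORT A =====
-- the for-loop over enumerate(token) with early returns, threading `state`;
-- the trailing `if state == 2 or state == 1` is the base case
def pvLoopA : List Char → Nat → Bool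
  | [], state => state == 2 || state == 1
  | ch :: rest, state =>
    if state == 0 then
      if ch == '0' then pvLoopA rest 1
      else if '1' ≤ ch && ch ≤ '9' then pvLoopA rest 2
      else false
    else if state == 1 then false
    else if state == 2 then
      if '0' ≤ ch && ch ≤ '9' then pvLoopA rest 2
      else false
    else pvLoopA rest state

def is_int_constant (token : String) : Bool :=
  if token == "" then false
  else pvLoopA token.toList 0

-- ===== PORT B =====
def is_int_constant_alt (token : String) : Bool :=
  if token == "" then false
  else if token == "0" then true
  else
    match token.toList with
    | [] => false   -- unreachable: token ≠ ""
    | c :: _ =>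
      if c == '0' then false
      else token.toList.all (fun ch => '0' ≤ ch && ch ≤ '9')

-- ===== PRECONDITION & SPEC =====
def Spec_is_int_constant (token : String) (out : Bool) : Prop := out = is_int_constant_alt token
instance (token : String) (out : Bool) : Decidable (Spec_is_int_constant token out) := by unfold Spec_is_int_constant; infer_instance

-- ===== CLAIM (what is proved, stated in full; the proofs are below) =====
def Claim_equal_is_int_constant : Prop := ∀ (token : String), Dom_is_int_constant token → Spec_is_int_constant token (is_int_constant token)

-- ===== LEMMAS AND PROOFS =====
lemma pvLoopA_two (l : List Char) :
    pvLoopA l 2 = l.all (fun ch => '0' ≤ ch && ch ≤ '9') := by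
  induction l with
  | nil => rfl
  | cons c rest ih =>
    by_cases hd : ('0' ≤ c && c ≤ '9') = true
    · simp [pvLoopA, hd, ih]
    · simp [pvLoopA, hd]

lemma pvLoopA_one (l : List Char) : pvLoopA l 1 = (l == []) := by
  cases l <;> rfl

lemma string_eq_iff_toList (s t : String) : (s = t) ↔ s.toList = t.toList := by
  constructor
  · intro h; rw [h]
  · intro h; exact String.ext (by simpa [String.data] using h)

lemma one_le_of_zero_lt {c : Char} (h1 : '0' ≤ c) (hne : c ≠ '0') : '1' ≤ c := by
  have hv : c.val ≠ '0'.val := fun h => hne (Char.ext h)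
  simp only [Char.le_def] at h1 ⊢
  simp only [UInt32.le_iff_toNat_le] at h1 ⊢
  have hv' : c.val.toNat ≠ ('0').val.toNat := fun h => hv (UInt32.toNat_inj.mp h)
  have : ('0').val.toNat = 48 := rfl
  have h1' : ('1').val.toNat = 49 := rfl
  omega

-- ===== VERDICT (by name: the statement is the Claim_ definition above) =====
theorem is_int_constant_spec : Claim_equal_is_int_constant := by
  intro token _
  unfold Spec_is_int_constant is_int_constant is_int_constant_alt
  by_cases hE : token = ""
  · simp [hE]
  · simp only [beq_iff_eq, hE, if_false]
    have hL : token.toList ≠ [] := by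
      intro h
      exact hE ((string_eq_iff_toList token "").mpr (by simpa using h))
    cases hl : token.toList with
    | nil => exact absurd hl hL
    | cons c rest =>
      have h0 : (token = "0") ↔ (c = '0' ∧ rest = []) := by
        rw [string_eq_iff_toList, hl]
        have : ("0" : String).toList = ['0'] := rfl
        rw [this]
        simp
      by_cases hc : c = '0'
      · subst hc
        by_cases hr : rest = []
        · have ht : token = "0" := h0.mpr ⟨rfl, hr⟩
          simp [ht, pvLoopA, pvLoopA_one, hr]
        · have ht : token ≠ "0" := fun h => hr (h0.mp h).2
          simp [ht, pvLoopA, pvLoopA_one, hr]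
      · have ht : token ≠ "0" := fun h => hc (h0.mp h).1
        by_cases hd : ('1' ≤ c && c ≤ '9') = true
        · rcases Bool.and_eq_true .. |>.mp hd with ⟨h1, h2⟩
          simp only [decide_eq_true_eq] at h1 h2
          have h0c : ('0' ≤ c && c ≤ '9') = true := by
            simp only [Bool.and_eq_true, decide_eq_true_eq]
            exact ⟨le_trans (by decide) h1, h2⟩
          simp [ht, hc, hd, hl, pvLoopA, pvLoopA_two, h0c]
        · have h0c : ¬ ('0' ≤ c && c ≤ '9') = true := by
            intro h
            rcases Bool.and_eq_true .. |>.mp h with ⟨h1, h2⟩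
            simp only [decide_eq_true_eq] at h1 h2
            apply hd
            simp only [Bool.and_eq_true, decide_eq_true_eq]
            exact ⟨one_le_of_zero_lt h1 hc, h2⟩
          simp [ht, hc, hd, hl, pvLoopA, h0c]
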